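-- pv_equiv track=rewrite | github.com/SumbizAVGNT/process_tracker | src/process_tracker/security/rbac.py | can
-- ===== SOURCE A (Python) =====
-- from typing import Iterable, Set
--
-- def _norm(s: str) -> str:
--     return (s or "").strip().lower()
--
-- def can(granted: Iterable[str], perm: str) -> bool:
--     """
--     Проверяет право `perm` с поддержкой шаблонов в наборе `granted`.
--
--     Поддерживаются варианты в granted:
--       - точные права: "task.create"
--       - подстановки:  "task.*", "admin.*"
--       - универсальные: "*", "*.*"
--
--     Примеры:
--       can({"task.*"}, "task.update")      -> True
--       can({"*"}, "anything.what.ever")    -> True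
--       can({"process.read"}, "task.read")  -> False
--     """
--     p = _norm(perm)
--     if not p:
--         return False
--
--     g: Set[str] = {_norm(x) for x in granted if x and str(x).strip()}
--     if p in g:
--         return True
--
--     # универсальные маски
--     if "*" in g or "*.*" in g:
--         return True
--
--     # "a.b.c" -> проверим "a.b.*" -> "a.*"
--     parts = p.split(".")
--     for i in range(len(parts), 0, -1):
--         if i == 1:
--             pat = "*"
--         else:
--             pat = ".".join(parts[: i - 1] + ["*"])
--         if pat in g:
--             return True
--
--     # иногда выделяют "admin.*" как суперправо
--     if "admin.*" in g:
--         return True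
--
--     return False
-- ===== SOURCE B (Python) =====
-- def _norm(s: str) -> str:
--     return (s or "").strip().lower()
--
-- _SUPER = ("*", "*.*", "admin.*")
--
-- def can(granted, perm: str) -> bool:
--     # Single scan over granted: each entry is matched directly against perm,
--     # no candidate-pattern set is built.
--     p = _norm(perm)
--     if not p:
--         return False
--     for x in granted:
--         q = _norm(x)
--         if not q:
--             continue
--         if q in _SUPER or q == p:
--             return True
--         if q.endswith(".*") and p.startswith(q[:-2] + "."):
--             return True
--     return False
-- ===== Notes on version B (the rewrite author's own statement) =====
-- stated objective: alternative
-- what changed: Instead of normalizing granted into a set and generating every wildcard candidate pattern of perm for set lookups, B makes one pass over granted and matches each normalized entry directly against perm (super-pattern, exact, or '.*'-prefix test).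
import Mathlib
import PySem

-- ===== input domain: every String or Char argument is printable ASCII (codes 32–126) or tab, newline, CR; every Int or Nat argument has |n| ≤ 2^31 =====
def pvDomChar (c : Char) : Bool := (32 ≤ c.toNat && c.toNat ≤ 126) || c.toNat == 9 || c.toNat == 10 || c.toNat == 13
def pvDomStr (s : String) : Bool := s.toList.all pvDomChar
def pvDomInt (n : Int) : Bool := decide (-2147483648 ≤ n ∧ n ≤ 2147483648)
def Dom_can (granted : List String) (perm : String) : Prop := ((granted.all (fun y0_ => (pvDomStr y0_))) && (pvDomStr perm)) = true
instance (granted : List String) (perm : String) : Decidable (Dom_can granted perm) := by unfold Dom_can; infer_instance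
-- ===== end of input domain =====

-- B replaces A's "normalize granted into a set, then generate every wildcard candidate of
-- perm and look each up" by a single direct scan matching each granted entry against perm.

-- ===== PORT A =====
-- Python helper _norm(s) = (s or "").strip().lower() (for a str argument, (s or "") = s)
def pvNorm (s : String) : String := PySem.Str.lower (PySem.Str.strip s)

def can (granted : List String) (perm : String) : Bool :=
  let p := pvNorm perm
  if p = "" then false
  else
    -- g = {_norm(x) for x in granted if x and str(x).strip()}
    let g : PySem.Set String :=
      PySem.Set.ofList ((granted.filter (fun x => !(x = "") && !(PySem.Str.strip x = ""))).map pvNorm)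
    if PySem.Set.contains g p then true
    else if PySem.Set.contains g "*" || PySem.Set.contains g "*.*" then true
    else
      -- parts = p.split("."); the separator "." is nonempty, so split? is never none
      let parts : List String := (PySem.Str.split? p ".").getD []
      -- for i in range(len(parts), 0, -1): ...  (early return True = any)
      if (PySem.List.pyRange (parts.length : Int) 0 (-1)).any (fun i =>
            let pat := if i = 1 then "*"
              else PySem.Str.join "." (PySem.List.slice parts none (some (i - 1)) ++ ["*"])
            PySem.Set.contains g pat) then true
      else if PySem.Set.contains g "admin.*" then true
      else false

-- ===== PORT B =====
def can_alt (granted : List String) (perm : String) : Bool :=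
  let p := pvNorm perm
  if p = "" then false
  else granted.any (fun x =>
    let q := pvNorm x
    if q = "" then false
    else if q = "*" || q = "*.*" || q = "admin.*" || q = p then true
    -- q[:-2] + "." ported as PySem.Str.slice q none (some (-2)) ++ "."
    else PySem.Str.endswith q ".*" && PySem.Str.startswith p (PySem.Str.slice q none (some (-2)) ++ "."))

-- ===== PRECONDITION & SPEC =====
def Spec_can (granted : List String) (perm : String) (out : Bool) : Prop := out = can_alt granted perm
instance (granted : List String) (perm : String) (out : Bool) : Decidable (Spec_can granted perm out) := by unfold Spec_can; infer_instance

-- ===== CLAIM (what is proved, stated in full; the proofs are below) =====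
def Claim_equal_can : Prop := ∀ (granted : List String) (perm : String), Dom_can granted perm → Spec_can granted perm (can granted perm)

-- ===== LEMMAS AND PROOFS =====

-- PySem.Chars.splitOn with a single-character separator is Mathlib's List.splitOn
theorem pv_splitOn_go_eq (c : Char) (fuel : Nat) (l cur : List Char) (acc : List (List Char))
    (h : l.length ≤ fuel) :
    PySem.Chars.splitOn.go [c] fuel l cur acc
      = acc.reverse ++ (List.splitOn c l).modifyHead (cur.reverse ++ ·) := by
  induction fuel generalizing l cur acc with
  | zero =>
    cases l with
    | nil => simp [PySem.Chars.splitOn.go, List.splitOn]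
    | cons a t => simp at h
  | succ n ih =>
    cases l with
    | nil => simp [PySem.Chars.splitOn.go, List.splitOn]
    | cons a t =>
      rw [PySem.Chars.splitOn.go]
      by_cases hac : a = c
      · subst hac
        have hpre : List.isPrefixOf [a] (a :: t) = true := by simp [List.isPrefixOf]
        rw [if_pos hpre]
        rw [ih _ _ _ (by simpa using h)]
        have hdrop : List.drop [a].length (a :: t) = t := rfl
        rw [hdrop]
        simp only [List.splitOn, List.splitOnP_cons, beq_self_eq_true, if_pos, List.reverse_cons,
          List.append_assoc, List.singleton_append, List.modifyHead_cons, List.reverse_nil,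
          List.nil_append]
        cases List.splitOnP (fun x => x == a) t <;> simp
      · have hpre : ¬ (List.isPrefixOf [c] (a :: t) = true) := by
          simp [List.isPrefixOf]; exact fun hh => (hac hh.symm).elim
        rw [if_neg hpre]
        rw [ih _ _ _ (by simp at h; omega)]
        have hne := List.splitOnP_ne_nil (fun x => x == c) t
        simp only [List.splitOn, List.splitOnP_cons]
        rw [if_neg (by simp [hac] : ¬ ((a == c) = true))]
        cases hsp : List.splitOnP (fun x => x == c) t with
        | nil => exact (hne hsp).elim
        | cons h0 t0 => simp

theorem pv_splitOn_eq (c : Char) (s : List Char) :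
    PySem.Chars.splitOn s [c] = List.splitOn c s := by
  rw [PySem.Chars.splitOn, pv_splitOn_go_eq c (s.length + 1) s [] [] (by omega)]
  cases List.splitOn c s <;> simp

-- intercalate over nonempty lists of pieces
theorem pv_intercalate_cons (sep x : List Char) (b : List (List Char)) (hb : b ≠ []) :
    List.intercalate sep (x :: b) = x ++ sep ++ List.intercalate sep b := by
  cases b with
  | nil => exact (hb rfl).elim
  | cons y c => simp [List.intercalate, List.intersperse_cons₂]

theorem pv_intercalate_append (sep : List Char) (a b : List (List Char)) (ha : a ≠ []) (hb : b ≠ []) :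
    List.intercalate sep (a ++ b) = List.intercalate sep a ++ sep ++ List.intercalate sep b := by
  induction a with
  | nil => exact (ha rfl).elim
  | cons x a ih =>
    cases a with
    | nil => rw [List.singleton_append, pv_intercalate_cons sep x b hb]; simp [List.intercalate]
    | cons y a2 =>
      rw [List.cons_append, pv_intercalate_cons sep x ((y :: a2) ++ b) (by simp),
        ih (by simp), pv_intercalate_cons sep x (y :: a2) (by simp)]
      simp [List.append_assoc]

-- the parts of p.split("."), as char lists
theorem pv_parts_eq (p : String) :
    ((PySem.Str.split? p ".").getD []).map String.toList = List.splitOn '.' p.toList := by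
  simp [PySem.Str.split?, PySem.Chars.split?, pv_splitOn_eq, List.map_map, Function.comp_def]

-- slice to -2 is take (length - 2)
theorem pv_slice_neg2 (q : String) :
    (PySem.Str.slice q none (some (-2))).toList = q.toList.take (q.toList.length - 2) := by
  rw [PySem.Str.toList_slice]
  simp only [PySem.Chars.slice_eq_listSlice, PySem.List.slice, PySem.List.clampIdx]
  norm_num
  split
  · omega
  · omega

-- membership in the descending range range(k, 0, -1)
theorem pv_mem_pyRange_down (k i : Int) :
    i ∈ PySem.List.pyRange k 0 (-1) ↔ 1 ≤ i ∧ i ≤ k := by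
  simp only [PySem.List.pyRange]
  split
  · omega
  · simp only [List.mem_map, List.mem_range]
    norm_num
    constructor
    · rintro ⟨j, hj, rfl⟩
      split at hj <;> omega
    · rintro ⟨h1, h2⟩
      refine ⟨(k - i).toNat, ?_, by omega⟩
      split <;> omega

-- core: B's wildcard test picks out exactly A's generated prefix patterns
theorem pv_wildcard_iff (pl ql : List Char) :
    (['.', '*'] <:+ ql ∧ (ql.take (ql.length - 2) ++ ['.']) <+: pl)
      ↔ ∃ j : Nat, 1 ≤ j ∧ j + 1 ≤ (List.splitOn '.' pl).length ∧
          ql = List.intercalate ['.'] ((List.splitOn '.' pl).take j) ++ ['.', '*'] := by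
  constructor
  · rintro ⟨⟨front, rfl⟩, hpre⟩
    have htake : (front ++ ['.', '*']).take ((front ++ ['.', '*']).length - 2) = front := by
      simp
    rw [htake] at hpre
    obtain ⟨t, ht⟩ := hpre
    have hpl : pl = front ++ '.' :: t := by rw [← ht]; simp
    have hsplit : List.splitOn '.' pl
        = List.splitOnP (· == '.') front ++ List.splitOnP (· == '.') t := by
      rw [hpl, List.splitOn, List.splitOnP_append_cons _ _ _ _ (by simp)]
    set j := (List.splitOnP (fun x => x == '.') front).length with hj
    have hj1 : 1 ≤ j := List.length_pos_of_ne_nil (List.splitOnP_ne_nil _ _)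
    have ht1 : 1 ≤ (List.splitOnP (fun x => x == '.') t).length :=
      List.length_pos_of_ne_nil (List.splitOnP_ne_nil _ _)
    refine ⟨j, hj1, by rw [hsplit]; simp; omega, ?_⟩
    have htk : (List.splitOn '.' pl).take j = List.splitOnP (· == '.') front := by
      rw [hsplit, List.take_append_of_le_length (by omega), List.take_length]
    rw [htk]
    have : List.intercalate ['.'] (List.splitOnP (· == '.') front) = front := by
      have := List.intercalate_splitOn front '.'
      rwa [List.splitOn] at this
    rw [this]
  · rintro ⟨j, hj1, hjk, rfl⟩
    refine ⟨⟨_, rfl⟩, ?_⟩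
    have htake : (List.intercalate ['.'] ((List.splitOn '.' pl).take j) ++ ['.', '*']).take
        ((List.intercalate ['.'] ((List.splitOn '.' pl).take j) ++ ['.', '*']).length - 2)
        = List.intercalate ['.'] ((List.splitOn '.' pl).take j) := by
      simp
    rw [htake]
    have hpl : pl = List.intercalate ['.'] (List.splitOn '.' pl) :=
      (List.intercalate_splitOn pl '.').symm
    have hdecomp : List.splitOn '.' pl
        = (List.splitOn '.' pl).take j ++ (List.splitOn '.' pl).drop j :=
      (List.take_append_drop _ _).symm
    have hsne : List.splitOn '.' pl ≠ [] := by
      rw [List.splitOn]; exact List.splitOnP_ne_nil _ _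
    have htne : (List.splitOn '.' pl).take j ≠ [] := by
      rw [Ne, List.take_eq_nil_iff]
      push Not
      exact ⟨by omega, hsne⟩
    have hdne : (List.splitOn '.' pl).drop j ≠ [] := by
      intro hnil
      have := congrArg List.length hnil
      simp at this
      omega
    conv_rhs => rw [hpl, hdecomp]
    rw [pv_intercalate_append _ _ _ htne hdne]
    refine ⟨List.intercalate ['.'] ((List.splitOn '.' pl).drop j), ?_⟩
    rw [List.append_assoc]

-- _norm x is empty iff x.strip() is empty
theorem pv_norm_empty (x : String) : pvNorm x = "" ↔ PySem.Str.strip x = "" := by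
  rw [pvNorm, ← String.toList_inj, ← String.toList_inj, PySem.Str.toList_lower]
  simp [PySem.Chars.lower]

-- B's per-entry wildcard clause, stated over A's candidate patterns
theorem pv_clause_iff (p q : String) :
    (PySem.Str.endswith q ".*" = true ∧
     PySem.Str.startswith p (PySem.Str.slice q none (some (-2)) ++ ".") = true)
    ↔ ∃ i : Int, 2 ≤ i ∧ i ≤ (((PySem.Str.split? p ".").getD []).length : Int) ∧
        q = PySem.Str.join "."
          (PySem.List.slice ((PySem.Str.split? p ".").getD []) none (some (i - 1)) ++ ["*"]) := by
  have hSPne : List.splitOn '.' p.toList ≠ [] := by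
    rw [List.splitOn]; exact List.splitOnP_ne_nil _ _
  have hlen : ((PySem.Str.split? p ".").getD []).length = (List.splitOn '.' p.toList).length := by
    rw [← pv_parts_eq, List.length_map]
  have hjoin : ∀ i : Int, 2 ≤ i →
      (PySem.Str.join "." (PySem.List.slice ((PySem.Str.split? p ".").getD []) none
          (some (i - 1)) ++ ["*"])).toList
      = List.intercalate ['.'] ((List.splitOn '.' p.toList).take (i - 1).toNat) ++ ['.', '*'] := by
    intro i hi
    rw [PySem.Str.toList_join, PySem.List.slice_to _ (by omega), List.map_append]
    have hx : List.map String.toList (List.take (i - 1).toNat ((PySem.Str.split? p ".").getD []))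
        = (List.splitOn '.' p.toList).take (i - 1).toNat := by
      rw [← pv_parts_eq, List.map_take]
    rw [hx]
    have htne : (List.splitOn '.' p.toList).take (i - 1).toNat ≠ [] := by
      rw [Ne, List.take_eq_nil_iff]; push Not; exact ⟨by omega, hSPne⟩
    show List.intercalate _ _ = _
    rw [pv_intercalate_append _ _ _ htne (by simp)]
    simp [List.intercalate]
  rw [PySem.Str.endswith_eq, PySem.Str.startswith_eq]
  have h1 : (PySem.Str.slice q none (some (-2)) ++ ("." : String)).toList
      = q.toList.take (q.toList.length - 2) ++ ['.'] := by
    rw [String.toList_append, pv_slice_neg2]; rfl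
  rw [h1]
  have hdotstar : ((".*" : String).toList) = ['.', '*'] := rfl
  rw [PySem.Chars.endswith_iff, PySem.Chars.startswith_iff, hdotstar]
  rw [pv_wildcard_iff p.toList q.toList]
  constructor
  · rintro ⟨j, hj1, hjk, hql⟩
    refine ⟨(j : Int) + 1, by omega, ?_, ?_⟩
    · rw [hlen]; exact_mod_cast hjk
    · rw [← String.toList_inj, hjoin ((j : Int) + 1) (by omega)]
      have : ((j : Int) + 1 - 1).toNat = j := by omega
      rw [this]; exact hql
  · rintro ⟨i, hi2, hik, hqe⟩
    refine ⟨(i - 1).toNat, by omega, ?_, ?_⟩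
    · rw [hlen] at hik; omega
    · rw [hqe, hjoin i hi2]

-- simple Bool fact for A's early-return chain
theorem pv_ifchain (c1 c2 c3 c4 : Bool) :
    ((if c1 then true else if c2 then true else if c3 then true
      else if c4 then true else false) = true)
    ↔ (c1 = true ∨ c2 = true ∨ c3 = true ∨ c4 = true) := by
  cases c1 <;> cases c2 <;> cases c3 <;> cases c4 <;> simp

-- B as an existential over granted
theorem pv_alt_iff (granted : List String) (perm : String) (hp : pvNorm perm ≠ "") :
    can_alt granted perm = true ↔ ∃ x ∈ granted, pvNorm x ≠ "" ∧
      (pvNorm x = "*" ∨ pvNorm x = "*.*" ∨ pvNorm x = "admin.*" ∨ pvNorm x = pvNorm perm ∨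
        (PySem.Str.endswith (pvNorm x) ".*" = true ∧
         PySem.Str.startswith (pvNorm perm)
           (PySem.Str.slice (pvNorm x) none (some (-2)) ++ ".") = true)) := by
  simp only [can_alt, if_neg hp, List.any_eq_true]
  refine exists_congr fun x => and_congr_right fun _ => ?_
  by_cases hq : pvNorm x = ""
  · rw [if_pos hq]
    exact ⟨fun h => absurd h (by simp), fun h => absurd hq h.1⟩
  · rw [if_neg hq]
    have hb : (decide (pvNorm x = "*") || decide (pvNorm x = "*.*")
        || decide (pvNorm x = "admin.*") || decide (pvNorm x = pvNorm perm)) = true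
        ↔ (pvNorm x = "*" ∨ pvNorm x = "*.*" ∨ pvNorm x = "admin.*"
            ∨ pvNorm x = pvNorm perm) := by
      simp only [Bool.or_eq_true, decide_eq_true_eq, or_assoc]
    by_cases h4 : pvNorm x = "*" ∨ pvNorm x = "*.*" ∨ pvNorm x = "admin.*" ∨ pvNorm x = pvNorm perm
    · rw [if_pos (hb.mpr h4)]
      refine ⟨fun _ => ⟨hq, ?_⟩, fun _ => rfl⟩
      rcases h4 with h | h | h | h
      exacts [Or.inl h, Or.inr (Or.inl h), Or.inr (Or.inr (Or.inl h)),
        Or.inr (Or.inr (Or.inr (Or.inl h)))]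
    · rw [if_neg (fun hc => h4 (hb.mp hc)), Bool.and_eq_true]
      constructor
      · exact fun h => ⟨hq, Or.inr (Or.inr (Or.inr (Or.inr h)))⟩
      · rintro ⟨-, h⟩
        rcases h with h | h | h | h | h
        exacts [absurd (Or.inl h) h4, absurd (Or.inr (Or.inl h)) h4,
          absurd (Or.inr (Or.inr (Or.inl h))) h4, absurd (Or.inr (Or.inr (Or.inr h))) h4, h]

-- A as an existential over granted
theorem pv_a_iff (granted : List String) (perm : String) (hp : pvNorm perm ≠ "") :
    can granted perm = true ↔ ∃ x ∈ granted, pvNorm x ≠ "" ∧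
      (pvNorm x = "*" ∨ pvNorm x = "*.*" ∨ pvNorm x = "admin.*" ∨ pvNorm x = pvNorm perm ∨
        ∃ i : Int, 2 ≤ i ∧ i ≤ (((PySem.Str.split? (pvNorm perm) ".").getD []).length : Int) ∧
          pvNorm x = PySem.Str.join "."
            (PySem.List.slice ((PySem.Str.split? (pvNorm perm) ".").getD []) none
              (some (i - 1)) ++ ["*"])) := by
  have hstrip0 : PySem.Str.strip "" = "" := by decide
  have hfilt : ∀ x : String,
      ((!(decide (x = "")) && !(decide (PySem.Str.strip x = ""))) = true) ↔ pvNorm x ≠ "" := by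
    intro x
    simp only [Bool.and_eq_true, Bool.not_eq_true', decide_eq_false_iff_not]
    constructor
    · rintro ⟨-, h2⟩; exact fun hn => h2 ((pv_norm_empty x).mp hn)
    · intro hn
      refine ⟨fun hx => hn ?_, fun hs => hn ((pv_norm_empty x).mpr hs)⟩
      subst hx; exact (pv_norm_empty _).mpr hstrip0
  have hc : ∀ q : String,
      (PySem.Set.contains (PySem.Set.ofList ((granted.filter
          (fun x => !(decide (x = "")) && !(decide (PySem.Str.strip x = "")))).map pvNorm)) q
        = true)
      ↔ ∃ x ∈ granted, pvNorm x ≠ "" ∧ pvNorm x = q := by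
    intro q
    simp only [PySem.Set.contains, List.contains_iff_mem, PySem.Set.mem_ofList, List.mem_map,
      List.mem_filter]
    constructor
    · rintro ⟨x, ⟨hxg, hφ⟩, rfl⟩; exact ⟨x, hxg, (hfilt x).mp hφ, rfl⟩
    · rintro ⟨x, hxg, hn, rfl⟩; exact ⟨x, ⟨hxg, (hfilt x).mpr hn⟩, rfl⟩
  rw [can]
  simp only [if_neg hp]
  rw [pv_ifchain, Bool.or_eq_true, List.any_eq_true]
  constructor
  · rintro (h | (h | h) | ⟨i, hir, hi⟩ | h)
    · obtain ⟨x, hxg, hn, he⟩ := (hc _).mp h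
      exact ⟨x, hxg, hn, Or.inr (Or.inr (Or.inr (Or.inl he)))⟩
    · obtain ⟨x, hxg, hn, he⟩ := (hc _).mp h
      exact ⟨x, hxg, hn, Or.inl he⟩
    · obtain ⟨x, hxg, hn, he⟩ := (hc _).mp h
      exact ⟨x, hxg, hn, Or.inr (Or.inl he)⟩
    · rw [pv_mem_pyRange_down] at hir
      by_cases hi1 : i = 1
      · rw [if_pos hi1] at hi
        obtain ⟨x, hxg, hn, he⟩ := (hc _).mp hi
        exact ⟨x, hxg, hn, Or.inl he⟩
      · rw [if_neg hi1] at hi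
        obtain ⟨x, hxg, hn, he⟩ := (hc _).mp hi
        exact ⟨x, hxg, hn, Or.inr (Or.inr (Or.inr (Or.inr ⟨i, by omega, by omega, he⟩)))⟩
    · obtain ⟨x, hxg, hn, he⟩ := (hc _).mp h
      exact ⟨x, hxg, hn, Or.inr (Or.inr (Or.inl he))⟩
  · rintro ⟨x, hxg, hn, (he | he | he | he | ⟨i, hi2, hik, he⟩)⟩
    · exact Or.inr (Or.inl (Or.inl ((hc _).mpr ⟨x, hxg, hn, he⟩)))
    · exact Or.inr (Or.inl (Or.inr ((hc _).mpr ⟨x, hxg, hn, he⟩)))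
    · exact Or.inr (Or.inr (Or.inr ((hc _).mpr ⟨x, hxg, hn, he⟩)))
    · exact Or.inl ((hc _).mpr ⟨x, hxg, hn, he⟩)
    · refine Or.inr (Or.inr (Or.inl ⟨i, ?_, ?_⟩))
      · rw [pv_mem_pyRange_down]; omega
      · rw [if_neg (by omega : ¬ i = 1)]
        exact (hc _).mpr ⟨x, hxg, hn, he⟩

-- ===== VERDICT (by name: the statement is the Claim_ definition above) =====
theorem can_spec : Claim_equal_can := by
  intro granted perm _
  unfold Spec_can
  by_cases hp : pvNorm perm = ""
  · simp only [can, can_alt, if_pos hp]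
  · rw [Bool.eq_iff_iff, pv_a_iff granted perm hp, pv_alt_iff granted perm hp]
    refine exists_congr fun x => and_congr_right fun _ => and_congr_right fun _ => ?_
    exact or_congr_right (or_congr_right (or_congr_right (or_congr_right
      (pv_clause_iff (pvNorm perm) (pvNorm x)).symm)))
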